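-- pv_equiv track=rewrite | github.com/tripunit/minrolemining | greedythenlattice.py | getdegtoverts
-- ===== SOURCE A (Python) =====
-- def getdegtoverts(up, pu):
--     verttodeg = dict()
--     degtoverts = dict()
--
--     for u in up:
--         du = len(up[u])
--         if du not in degtoverts:
--             degtoverts[du] = set()
--         verttodeg['u'+str(u)] = du
--         (degtoverts[du]).add('u'+str(u))
--
--     for p in pu:
--         dp = len(pu[p])
--         if dp not in degtoverts:
--             degtoverts[dp] = set()
--         verttodeg['p'+str(p)] = dp
--         (degtoverts[dp]).add('p'+str(p))
--
--     return degtoverts, verttodeg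
-- ===== SOURCE B (Python) =====
-- def getdegtoverts(up, pu):
--     # Staged pipeline instead of A's two fused loops:
--     # flat parallel name/degree lists, then each output map built by its own pass.
--     names = ['u' + str(u) for u in up] + ['p' + str(p) for p in pu]
--     degs = [len(vs) for vs in up.values()] + [len(vs) for vs in pu.values()]
--
--     verttodeg = dict(zip(names, degs))
--
--     # distinct degrees, first-occurrence order
--     seen = []
--     for d in degs:
--         if d not in seen:
--             seen.append(d)
--
--     # group vertices per distinct degree by a scan over the flat lists
--     degtoverts = {d: {n for n, dd in zip(names, degs) if dd == d} for d in seen}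
--     return degtoverts, verttodeg
-- ===== Notes on version B (the rewrite author's own statement) =====
-- stated objective: alternative
-- what changed: A runs two fused loops each maintaining both dicts at once; B is a staged pipeline: flat parallel name/degree lists, verttodeg via dict(zip(...)), distinct degrees collected in first-occurrence order, and degtoverts grouped by a separate scan per distinct degree (a comprehension over the flat lists).
import Mathlib
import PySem

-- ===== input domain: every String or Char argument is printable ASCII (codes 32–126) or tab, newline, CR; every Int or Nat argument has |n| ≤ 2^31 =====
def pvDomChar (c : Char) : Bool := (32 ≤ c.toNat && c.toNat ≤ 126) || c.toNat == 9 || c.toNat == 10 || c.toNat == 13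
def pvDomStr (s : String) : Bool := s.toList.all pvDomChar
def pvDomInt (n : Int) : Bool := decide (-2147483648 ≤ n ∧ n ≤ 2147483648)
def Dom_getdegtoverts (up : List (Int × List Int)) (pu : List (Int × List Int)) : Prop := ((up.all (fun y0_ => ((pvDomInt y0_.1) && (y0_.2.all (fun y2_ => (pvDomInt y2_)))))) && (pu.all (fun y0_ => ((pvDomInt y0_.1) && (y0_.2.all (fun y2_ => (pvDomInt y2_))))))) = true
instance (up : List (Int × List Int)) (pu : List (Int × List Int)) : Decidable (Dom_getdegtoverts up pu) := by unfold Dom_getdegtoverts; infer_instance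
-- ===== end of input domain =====

-- B replaces A's two fused loops (each maintaining both dicts at once) with a staged pipeline:
-- flat name/degree lists, verttodeg from dict(zip), then degtoverts by a scan per distinct
-- degree. Equivalence of the RETURN values is proved.

-- ===== PORT A =====
-- 'u'+str(u) / 'p'+str(p): the tag character followed by the characters of str(n) (exact)
def pvName (pre : Char) (n : Int) : String := String.ofList (pre :: PySem.Int.toChars n)

-- one iteration of A's loop body ('for u in up' resp. 'for p in pu'); pre is the tag 'u'/'p'.
-- 'du = len(up[u])' is read off the pair being iterated, exact since a Python dict's keys are unique.
def pvStepA (pre : Char) (st : PySem.Dict Int (PySem.Set String) × PySem.Dict String Int)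
    (kv : Int × List Int) : PySem.Dict Int (PySem.Set String) × PySem.Dict String Int :=
  let du : Int := kv.2.length
  let degtoverts := if st.1.contains du then st.1 else st.1.insert du PySem.Set.empty
  let name : String := pvName pre kv.1
  let verttodeg := st.2.insert name du
  let degtoverts := degtoverts.insert du (PySem.Set.add (degtoverts.getD du PySem.Set.empty) name)
  (degtoverts, verttodeg)

def getdegtoverts (up : List (Int × List Int)) (pu : List (Int × List Int)) :
    (List (Int × List String)) × (List (String × Int)) :=
  let st := up.foldl (pvStepA 'u') (PySem.Dict.empty, PySem.Dict.empty)
  let st := pu.foldl (pvStepA 'p') st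
  (st.1.items, st.2.items)

-- ===== PORT B =====
def getdegtoverts_alt (up : List (Int × List Int)) (pu : List (Int × List Int)) :
    (List (Int × List String)) × (List (String × Int)) :=
  -- flat parallel lists of vertex names and degrees
  let names : List String := up.map (fun kv => pvName 'u' kv.1) ++ pu.map (fun kv => pvName 'p' kv.1)
  let degs : List Int := up.map (fun kv => (kv.2.length : Int)) ++ pu.map (fun kv => (kv.2.length : Int))
  -- verttodeg = dict(zip(names, degs))
  let verttodeg := PySem.Dict.ofList (names.zip degs)
  -- distinct degrees in first-occurrence order ('if d not in seen: seen.append(d)')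
  let seen : PySem.Set Int := degs.foldl PySem.Set.add PySem.Set.empty
  -- degtoverts = {d: {n for n, dd in zip(names, degs) if dd == d} for d in seen}
  let degtoverts := PySem.Dict.ofList (seen.map (fun d =>
      (d, PySem.Set.ofList (((names.zip degs).filter (fun q => q.2 == d)).map (fun q => q.1)))))
  (degtoverts.items, verttodeg.items)

-- ===== PRECONDITION & SPEC =====
def Spec_getdegtoverts (up : List (Int × List Int)) (pu : List (Int × List Int)) (out : (List (Int × List String)) × (List (String × Int))) : Prop := out = getdegtoverts_alt up pu
instance (up : List (Int × List Int)) (pu : List (Int × List Int)) (out : (List (Int × List String)) × (List (String × Int))) : Decidable (Spec_getdegtoverts up pu out) := by unfold Spec_getdegtoverts; infer_instance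

-- ===== CLAIM (what is proved, stated in full; the proofs are below) =====
def Claim_equal_getdegtoverts : Prop := ∀ (up : List (Int × List Int)) (pu : List (Int × List Int)), Dom_getdegtoverts up pu → Spec_getdegtoverts up pu (getdegtoverts up pu)

-- ===== LEMMAS AND PROOFS =====

-- the dict-modify form A's degtoverts update reduces to (proof-only helper)
def pvDStep (d : PySem.Dict Int (PySem.Set String)) (kv : String × Int) :
    PySem.Dict Int (PySem.Set String) :=
  d.modify kv.2 PySem.Set.empty (fun s => PySem.Set.add s kv.1)

theorem pvStepA_eq (pre : Char) (st : PySem.Dict Int (PySem.Set String) × PySem.Dict String Int)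
    (kv : Int × List Int) :
    pvStepA pre st kv =
      (pvDStep st.1 (pvName pre kv.1, (kv.2.length : Int)),
       st.2.insert (pvName pre kv.1) (kv.2.length : Int)) := by
  unfold pvStepA pvDStep
  by_cases h : st.1.contains (kv.2.length : Int) = true
  · simp [h, PySem.Dict.modify]
  · simp only [h, if_false, Bool.false_eq_true]
    rw [PySem.Dict.getD_insert_self, PySem.Dict.insert_insert_self, PySem.Dict.modify,
        PySem.Dict.getD_of_not_contains _ _ (by simpa using h)]

-- lookup through A's degtoverts fold: the names whose degree is c, folded with Set.add
theorem pv_getD_fold (l : List (String × Int)) (d : PySem.Dict Int (PySem.Set String)) (c : Int) :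
    (l.foldl pvDStep d).getD c PySem.Set.empty
      = ((l.filter (fun p => p.2 == c)).map Prod.fst).foldl PySem.Set.add
          (d.getD c PySem.Set.empty) := by
  induction l generalizing d with
  | nil => rfl
  | cons p l ih =>
    simp only [List.foldl_cons, List.filter_cons]
    by_cases h : p.2 = c
    · simp only [h, beq_self_eq_true, if_pos, List.map_cons, List.foldl_cons, ih,
        pvDStep, PySem.Dict.getD_modify_self]
    · have hb : (p.2 == c) = false := by simpa using h
      simp only [hb, Bool.false_eq_true, if_false, ih, pvDStep,
        PySem.Dict.getD_modify, if_neg (fun hc => h (Eq.symm hc))]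

-- ===== VERDICT (by name: the statement is the Claim_ definition above) =====
set_option maxHeartbeats 1000000 in
theorem getdegtoverts_spec : Claim_equal_getdegtoverts := by
  intro up pu _
  unfold Spec_getdegtoverts getdegtoverts getdegtoverts_alt
  have hA : ∀ pre : Char, pvStepA pre = fun st kv =>
      (pvDStep st.1 (pvName pre kv.1, (kv.2.length : Int)),
       st.2.insert (pvName pre kv.1) (kv.2.length : Int)) := by
    intro pre; funext st kv; exact pvStepA_eq pre st kv
  have hsplit : ∀ (l : List (Int × List Int)) (pre : Char)
      (a : PySem.Dict Int (PySem.Set String)) (b : PySem.Dict String Int),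
      List.foldl (fun st kv =>
          (pvDStep st.1 (pvName pre kv.1, (kv.2.length : Int)),
           st.2.insert (pvName pre kv.1) (kv.2.length : Int)))
        (a, b) l
      = (List.foldl (fun d kv =>
            pvDStep d (pvName pre kv.1, (kv.2.length : Int))) a l,
         List.foldl (fun v kv =>
            v.insert (pvName pre kv.1) (kv.2.length : Int)) b l) := by
    intro l pre a b
    exact PySem.List.foldl_prod_mk
      (f := fun d kv => pvDStep d (pvName pre kv.1, (kv.2.length : Int)))
      (g := fun v kv => v.insert (pvName pre kv.1) (kv.2.length : Int)) l a b
  simp only [hA]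
  rw [hsplit, hsplit]
  -- the flat (name, degree) pairs list both sides traverse
  have hzip :
      (up.map (fun kv => pvName 'u' kv.1) ++ pu.map (fun kv => pvName 'p' kv.1)).zip
        (up.map (fun kv => (kv.2.length : Int)) ++ pu.map (fun kv => (kv.2.length : Int)))
      = up.map (fun kv => (pvName 'u' kv.1, (kv.2.length : Int)))
        ++ pu.map (fun kv => (pvName 'p' kv.1, (kv.2.length : Int))) := by
    rw [List.zip_append (by simp), List.zip_map', List.zip_map']
  rw [hzip]
  -- name the pairs list
  set pairs := up.map (fun kv => (pvName 'u' kv.1, (kv.2.length : Int)))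
      ++ pu.map (fun kv => (pvName 'p' kv.1, (kv.2.length : Int))) with hpairs
  -- A's two remaining folds are folds over `pairs`
  have hfoldA1 :
      List.foldl (fun d kv => pvDStep d (pvName 'p' kv.1, (kv.2.length : Int)))
        (List.foldl (fun d kv => pvDStep d (pvName 'u' kv.1, (kv.2.length : Int)))
          PySem.Dict.empty up) pu
      = pairs.foldl pvDStep PySem.Dict.empty := by
    simp [hpairs, List.foldl_append, List.foldl_map]
  have hfoldA2 :
      List.foldl (fun v kv => v.insert (pvName 'p' kv.1) (kv.2.length : Int))
        (List.foldl (fun v kv => v.insert (pvName 'u' kv.1) (kv.2.length : Int))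
          PySem.Dict.empty up) pu
      = pairs.foldl (fun d p => d.insert p.1 p.2) PySem.Dict.empty := by
    simp [hpairs, List.foldl_append, List.foldl_map]
  rw [hfoldA1, hfoldA2]
  have hdegs : (up.map (fun kv => ((kv.2.length : Int))) ++ pu.map (fun kv => ((kv.2.length : Int))))
      = pairs.map Prod.snd := by simp [hpairs, Function.comp_def]
  rw [hdegs]
  -- seen = set(degs) in first-occurrence order
  rw [show (pairs.map Prod.snd).foldl PySem.Set.add PySem.Set.empty
        = PySem.Set.ofList (pairs.map Prod.snd) from (PySem.Set.ofList_eq_foldl _).symm]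
  -- verttodeg: dict(zip) is the same insert fold
  have hvd : PySem.Dict.ofList pairs = pairs.foldl (fun d p => d.insert p.1 p.2) PySem.Dict.empty := by
    simp [PySem.Dict.ofList, PySem.Dict.update]
  rw [hvd]
  -- the A-side degree dict
  have hstep : (fun (d : PySem.Dict Int (PySem.Set String)) (x : String × Int) =>
      d.modify (Prod.snd x) PySem.Set.empty ((fun _ kv s => PySem.Set.add s kv.1) d x)) = pvDStep := rfl
  have hXkeys : (pairs.foldl pvDStep PySem.Dict.empty).keys = PySem.Set.ofList (pairs.map Prod.snd) := by
    have h := PySem.Dict.keys_foldl_modify_key pairs Prod.snd PySem.Set.empty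
      (fun _ kv s => PySem.Set.add s kv.1) PySem.Dict.empty
    rw [hstep] at h
    rw [h, PySem.Dict.keys_empty, PySem.Set.update, PySem.Set.ofList_eq_foldl]
  have hXnodup : (pairs.foldl pvDStep PySem.Dict.empty).keys.Nodup := by
    have h := PySem.Dict.nodup_keys_foldl_modify_key pairs Prod.snd PySem.Set.empty
      (fun _ kv s => PySem.Set.add s kv.1) PySem.Dict.empty (by simp)
    rwa [hstep] at h
  have hgetD : ∀ c : Int, (pairs.foldl pvDStep PySem.Dict.empty).getD c PySem.Set.empty
      = PySem.Set.ofList ((pairs.filter (fun q => q.2 == c)).map (fun q => q.1)) := by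
    intro c
    rw [pv_getD_fold, PySem.Dict.getD_empty, PySem.Set.ofList_eq_foldl]
    rfl
  -- B's degtoverts dict has fresh distinct keys, so its items ARE the comprehension list
  have hB : (PySem.Dict.ofList ((PySem.Set.ofList (pairs.map Prod.snd)).map (fun d =>
      (d, PySem.Set.ofList ((pairs.filter (fun q => q.2 == d)).map (fun q => q.1)))))).items
      = (PySem.Set.ofList (pairs.map Prod.snd)).map (fun d =>
      (d, PySem.Set.ofList ((pairs.filter (fun q => q.2 == d)).map (fun q => q.1)))) := by
    simp only [PySem.Dict.ofList, PySem.Dict.update]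
    rw [PySem.Dict.items_foldl_insert_fresh _ Prod.fst Prod.snd PySem.Dict.empty
      (by intro a _; simp [PySem.Dict.contains_empty]) (by simp [List.map_map, Function.comp_def])]
    simp [Function.comp_def, PySem.Dict.empty]
  rw [hB]
  -- A's items, expressed over its (nodup) keys, are the same list
  rw [PySem.Dict.items_eq_map_keys _ hXnodup PySem.Set.empty, hXkeys]
  simp only [hgetD]
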